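-- pv_equiv track=rewrite | github.com/charx7/scalable-parallel-fp-growth | pyspark_src/pyspark_recom_engine/utils/dataframeUdfs.py | list_sorter
-- ===== SOURCE A (Python) =====
-- def list_sorter(transaction, sorted_items_dict):
--     # Get the list of sorted items from the dict
--     sorted_items_list = list(sorted_items_dict.keys())
--
--     # Filtering out the items that do not appear in the sorted items list
--     filtered_transaction = [item for item in transaction if item in sorted_items_list]
--
--     # Order a transaction by the sorted items dict
--     ordered_transaction_list = []
--     for row in sorted_items_dict.keys():
--         if row in filtered_transaction:
--             ordered_transaction_list.append(row)
--
--     if len(ordered_transaction_list) == 0: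
--         return None
--
--     return ordered_transaction_list
-- ===== SOURCE B (Python) =====
-- def list_sorter(transaction, sorted_items_dict):
--     # Index the dict keys once, collect the transaction's distinct matching items,
--     # then sort them by their stored dict-key position.
--     pos = {key: i for i, key in enumerate(sorted_items_dict)}
--     items = set(t for t in transaction if t in pos)
--     if not items:
--         return None
--     return sorted(items, key=lambda x: pos[x])
-- ===== Notes on version B (the rewrite author's own statement) =====
-- stated objective: faster
-- what changed: Replaces A's filter-pass plus scan over all dict keys with a quadratic inner list membership test by a position index built once over the dict keys, a set of the transaction's matching items, and a sort of those items by their stored position.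
import Mathlib
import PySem

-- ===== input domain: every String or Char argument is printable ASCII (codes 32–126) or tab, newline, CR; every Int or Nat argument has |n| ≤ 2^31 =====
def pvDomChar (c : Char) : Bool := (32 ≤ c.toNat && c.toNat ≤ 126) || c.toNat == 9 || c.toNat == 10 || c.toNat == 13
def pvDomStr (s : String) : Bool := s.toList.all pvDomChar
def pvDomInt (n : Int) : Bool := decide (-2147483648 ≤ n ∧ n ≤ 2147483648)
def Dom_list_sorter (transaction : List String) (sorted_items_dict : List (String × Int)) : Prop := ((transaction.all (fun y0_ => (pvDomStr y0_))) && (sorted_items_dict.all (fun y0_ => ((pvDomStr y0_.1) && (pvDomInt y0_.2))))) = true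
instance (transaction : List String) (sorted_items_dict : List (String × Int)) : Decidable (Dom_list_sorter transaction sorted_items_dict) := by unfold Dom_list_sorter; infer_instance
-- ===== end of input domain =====

-- B replaces A's scan-the-dict-keys-with-inner-membership-loop by a position index
-- built once plus a sort of the transaction's own distinct matching items (objective: alternative).

-- ===== PORT A =====
def list_sorter (transaction : List String) (sorted_items_dict : List (String × Int)) : Option (List String) :=
  let sorted_items_list := (PySem.Dict.ofList sorted_items_dict).keys
  let filtered_transaction := transaction.filter (fun item => sorted_items_list.contains item)
  let ordered_transaction_list :=
    sorted_items_list.foldl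
      (fun acc row => if filtered_transaction.contains row then acc ++ [row] else acc) []
  if ordered_transaction_list.length = 0 then none
  else some ordered_transaction_list

-- ===== PORT B =====
def list_sorter_alt (transaction : List String) (sorted_items_dict : List (String × Int)) : Option (List String) :=
  -- pos = {key: i for i, key in enumerate(sorted_items_dict)}
  let pos : PySem.Dict String Int :=
    (PySem.List.enumerate ((PySem.Dict.ofList sorted_items_dict).keys)).foldl
      (fun p iv => p.insert iv.2 iv.1) PySem.Dict.empty
  -- items = set(t for t in transaction if t in pos)
  let items := PySem.Set.ofList (transaction.filter (fun t => pos.contains t))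
  if items.isEmpty then none
  -- pos[x]: every element of items is a key of pos, so getD's default is never used
  else some (PySem.List.sorted items (fun x => pos.getD x 0) false)

-- ===== PRECONDITION & SPEC =====
def Spec_list_sorter (transaction : List String) (sorted_items_dict : List (String × Int)) (out : Option (List String)) : Prop := out = list_sorter_alt transaction sorted_items_dict
instance (transaction : List String) (sorted_items_dict : List (String × Int)) (out : Option (List String)) : Decidable (Spec_list_sorter transaction sorted_items_dict out) := by unfold Spec_list_sorter; infer_instance

-- ===== CLAIM (what is proved, stated in full; the proofs are below) =====
def Claim_equal_list_sorter : Prop := ∀ (transaction : List String) (sorted_items_dict : List (String × Int)), Dom_list_sorter transaction sorted_items_dict → Spec_list_sorter transaction sorted_items_dict (list_sorter transaction sorted_items_dict)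

-- ===== LEMMAS AND PROOFS =====

-- The position dict does not touch keys outside the enumerated list.
theorem posFold_get?_not_mem (ks : List String) (s : Int) (p : PySem.Dict String Int)
    (k : String) (hk : k ∉ ks) :
    ((PySem.List.enumerate ks s).foldl (fun p iv => p.insert iv.2 iv.1) p).get? k = p.get? k := by
  induction ks generalizing s p with
  | nil => simp [PySem.List.enumerate_nil]
  | cons a t ih =>
    rw [PySem.List.enumerate_cons]
    simp only [List.foldl_cons]
    rw [ih _ _ (fun h => hk (List.mem_cons_of_mem _ h))]
    exact PySem.Dict.get?_insert_of_ne _ _ (fun h => hk (h ▸ List.mem_cons_self))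

-- On a nodup list the position dict stores each element's index (offset by the start).
theorem posFold_get?_getElem (ks : List String) (s : Int) (p : PySem.Dict String Int)
    (hnd : ks.Nodup) (i : Nat) (hi : i < ks.length) :
    ((PySem.List.enumerate ks s).foldl (fun p iv => p.insert iv.2 iv.1) p).get? ks[i] =
      some (s + i) := by
  induction ks generalizing s p i with
  | nil => simp at hi
  | cons a t ih =>
    rw [PySem.List.enumerate_cons]
    simp only [List.foldl_cons]
    rw [List.nodup_cons] at hnd
    obtain ⟨ha, hnd'⟩ := hnd
    cases i with
    | zero =>
      simp only [List.getElem_cons_zero]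
      rw [posFold_get?_not_mem t (s + 1) _ a ha]
      simp [PySem.Dict.get?_insert_self]
    | succ j =>
      have hj : j < t.length := by simpa using hi
      have := ih (s + 1) (p.insert a s) hnd' j hj
      simp only [List.getElem_cons_succ]
      rw [this]
      congr 1
      push_cast
      ring

theorem posFold_contains (ks : List String) (k : String) :
    ((PySem.List.enumerate ks 0).foldl (fun p iv => p.insert iv.2 iv.1)
        (PySem.Dict.empty : PySem.Dict String Int)).contains k = ks.contains k := by
  by_cases hk : k ∈ ks
  · obtain ⟨i, hi, rfl⟩ := List.getElem_of_mem hk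
    rw [PySem.Dict.contains_eq_isSome_get?]
    by_cases hnd : ks.Nodup
    · rw [posFold_get?_getElem ks 0 _ hnd i hi]
      simp [hk]
    · -- membership of the fold's keys only needs get? ≠ none; derive it generically
      have : ∀ (l : List String) (s : Int) (p : PySem.Dict String Int) (x : String), x ∈ l →
          (((PySem.List.enumerate l s).foldl (fun p iv => p.insert iv.2 iv.1) p).get? x).isSome := by
        intro l
        induction l with
        | nil => intro _ _ _ hx; simp at hx
        | cons a t ih2 =>
          intro s p x hx
          rw [PySem.List.enumerate_cons]
          simp only [List.foldl_cons]
          by_cases hxt : x ∈ t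
          · exact ih2 (s + 1) _ x hxt
          · have hxa : x = a := by
              rcases List.mem_cons.mp hx with h | h
              · exact h
              · exact absurd h hxt
            rw [posFold_get?_not_mem t (s + 1) _ x hxt, hxa, PySem.Dict.get?_insert_self]
            simp
      have := this ks 0 PySem.Dict.empty _ hk
      simp [this, hk]
  · rw [PySem.Dict.contains_eq_isSome_get?, posFold_get?_not_mem ks 0 _ k hk]
    simp [PySem.Dict.get?_empty, hk]

-- Along a nodup key list the stored positions are strictly increasing.
theorem posFold_pairwise (ks : List String) (hnd : ks.Nodup) :
    ks.Pairwise (fun a b =>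
      ((PySem.List.enumerate ks 0).foldl (fun p iv => p.insert iv.2 iv.1)
          (PySem.Dict.empty : PySem.Dict String Int)).getD a 0 <
      ((PySem.List.enumerate ks 0).foldl (fun p iv => p.insert iv.2 iv.1)
          (PySem.Dict.empty : PySem.Dict String Int)).getD b 0) := by
  rw [List.pairwise_iff_getElem]
  intro i j hi hj hij
  rw [PySem.Dict.getD_eq_get?_getD, PySem.Dict.getD_eq_get?_getD,
    posFold_get?_getElem ks 0 _ hnd i hi, posFold_get?_getElem ks 0 _ hnd j hj]
  simp only [Option.getD_some, Int.zero_add]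
  exact_mod_cast hij

theorem list_sorter_eq (transaction : List String) (sorted_items_dict : List (String × Int)) :
    list_sorter transaction sorted_items_dict = list_sorter_alt transaction sorted_items_dict := by
  unfold list_sorter list_sorter_alt
  set ks := (PySem.Dict.ofList sorted_items_dict).keys with hks
  have hnd : ks.Nodup := PySem.Dict.nodup_keys_ofList sorted_items_dict
  set pos := (PySem.List.enumerate ks 0).foldl (fun p iv => p.insert iv.2 iv.1)
      (PySem.Dict.empty : PySem.Dict String Int) with hpos
  simp only []
  -- A's ordered list is ks filtered by membership in transaction
  rw [PySem.List.foldl_append_if_eq_filter]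
  have hAfilter : ks.filter (fun row => (transaction.filter (fun item => ks.contains item)).contains row)
      = ks.filter (fun row => transaction.contains row) := by
    apply List.filter_congr
    intro row hrow
    simp [List.mem_filter, hrow]
  rw [List.nil_append, hAfilter]
  -- B's filter is transaction filtered by membership in ks
  have hBfilter : transaction.filter (fun t => pos.contains t)
      = transaction.filter (fun t => ks.contains t) := by
    apply List.filter_congr
    intro t _
    rw [hpos, posFold_contains]
  rw [hBfilter]
  set ysA := ks.filter (fun row => transaction.contains row) with hysA
  set items := PySem.Set.ofList (transaction.filter (fun t => ks.contains t)) with hitems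
  have hmem : ∀ x, x ∈ items ↔ x ∈ ysA := by
    intro x
    rw [hitems, hysA, PySem.Set.mem_ofList]
    simp only [List.mem_filter, List.contains_iff_mem]
    constructor
    · rintro ⟨h1, h2⟩; exact ⟨by simpa using h2, by simpa using h1⟩
    · rintro ⟨h1, h2⟩; exact ⟨by simpa using h2, by simpa using h1⟩
  have hperm : ysA.Perm items := by
    rw [List.perm_ext_iff_of_nodup (hnd.filter _) (PySem.Set.nodup_ofList _)]
    intro a; exact (hmem a).symm
  have hempty : items.isEmpty = true ↔ ysA.length = 0 := by
    rw [List.isEmpty_iff, List.length_eq_zero_iff]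
    constructor
    · intro h
      rw [List.eq_nil_iff_forall_not_mem]
      intro x hx
      exact absurd ((hmem x).mpr hx) (by simp [h])
    · intro h
      rw [List.eq_nil_iff_forall_not_mem]
      intro x hx
      exact absurd ((hmem x).mp hx) (by simp [h])
  by_cases hz : ysA.length = 0
  · rw [if_pos hz, if_pos (hempty.mpr hz)]
  · rw [if_neg hz, if_neg (fun h => hz (hempty.mp h))]
    congr 1
    have hpw : ysA.Pairwise (fun a b => pos.getD a 0 < pos.getD b 0) := by
      rw [hysA]
      exact (posFold_pairwise ks hnd).filter _
    exact (PySem.List.sorted_eq_of_perm_of_pairwise_lt _ _ _ hperm hpw).symm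

-- ===== VERDICT (by name: the statement is the Claim_ definition above) =====
theorem list_sorter_spec : Claim_equal_list_sorter := by
  intro transaction sorted_items_dict _
  exact list_sorter_eq transaction sorted_items_dict
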